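-- pv_equiv track=rewrite | github.com/christopher-burke/warmups | python/misc/combinations.py | k_length_combinations
-- ===== SOURCE A (Python) =====
-- from itertools import combinations
-- from typing import List
--
-- def k_length_combinations(text: str, k: int) -> List:
--     """Return a list of all possible combinations of text of up to length k."""
--     combos = []
--     if k > len(text):
--         return []
--     for i in range(1, k+1):
--         combos.append([''.join(combo)
--                        for combo in combinations(sorted(text), i)])
--     return [item for sublist in list(combos) for item in sublist]
-- ===== SOURCE B (Python) =====
-- def k_length_combinations(text, k):
--     """Return a list of all possible combinations of text of up to length k."""
--     if k > len(text):
--         return []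
--     s = sorted(text)
--
--     def rec(s, r):
--         if r == 0:
--             return ['']
--         if not s:
--             return []
--         return [s[0] + tail for tail in rec(s[1:], r - 1)] + rec(s[1:], r)
--
--     result = []
--     for r in range(1, k + 1):
--         result += rec(s, r)
--     return result
-- ===== Notes on version B (the rewrite author's own statement) =====
-- stated objective: simpler
-- what changed: Replaced itertools.combinations plus a list-of-lists flattening comprehension by a direct recursive generator that builds each combination string itself (pick the head or skip it), appending each size's results as they are produced.
import Mathlib
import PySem

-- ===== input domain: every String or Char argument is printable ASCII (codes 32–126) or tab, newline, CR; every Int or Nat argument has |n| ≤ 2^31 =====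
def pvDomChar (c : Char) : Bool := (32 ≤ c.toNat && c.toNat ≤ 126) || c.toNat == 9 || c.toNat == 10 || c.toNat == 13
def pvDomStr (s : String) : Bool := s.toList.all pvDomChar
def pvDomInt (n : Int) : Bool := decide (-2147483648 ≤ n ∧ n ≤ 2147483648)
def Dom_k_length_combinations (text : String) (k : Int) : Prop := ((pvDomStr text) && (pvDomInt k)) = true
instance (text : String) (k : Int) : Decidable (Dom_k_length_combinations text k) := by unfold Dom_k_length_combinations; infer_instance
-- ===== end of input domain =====

-- B replaces itertools.combinations + list-of-lists flattening by a direct recursive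
-- generator that builds the strings itself (objective: simpler, no speed claim).

-- ===== PORT A =====
-- A: guard k > len(text); for i in 1..k collect ''.join over itertools.combinations(sorted(text), i); flatten.
def k_length_combinations (text : String) (k : Int) : List String :=
  if k > PySem.Str.len text then []
  else
    let combos := (PySem.List.pyRange 1 (k + 1) 1).map (fun i =>
      (PySem.List.combinations (PySem.List.sorted text.toList (fun c => c) false) i.toNat).map
        (fun combo => String.ofList combo))
    combos.flatten

-- ===== PORT B =====
-- rec(s, r): the strings obtained by picking r characters from s in order.
def pvRecB : List Char → Nat → List String
  | _, 0 => [""]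
  | [], _ + 1 => []
  | c :: cs, r + 1 =>
      (pvRecB cs r).map (fun tail => String.ofList (c :: tail.toList)) ++ pvRecB cs (r + 1)

def k_length_combinations_alt (text : String) (k : Int) : List String :=
  if k > PySem.Str.len text then []
  else
    let s := PySem.List.sorted text.toList (fun c => c) false
    (PySem.List.pyRange 1 (k + 1) 1).foldl (fun result r => result ++ pvRecB s r.toNat) []

-- ===== PRECONDITION & SPEC =====
def Spec_k_length_combinations (text : String) (k : Int) (out : List String) : Prop := out = k_length_combinations_alt text k
instance (text : String) (k : Int) (out : List String) : Decidable (Spec_k_length_combinations text k out) := by unfold Spec_k_length_combinations; infer_instance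

-- ===== CLAIM (what is proved, stated in full; the proofs are below) =====
def Claim_equal_k_length_combinations : Prop := ∀ (text : String) (k : Int), Dom_k_length_combinations text k → Spec_k_length_combinations text k (k_length_combinations text k)

-- ===== LEMMAS AND PROOFS =====

-- B's recursive generator produces exactly A's joined combinations, in the same order.
theorem pvRecB_eq_combinations (s : List Char) (r : Nat) :
    pvRecB s r = (PySem.List.combinations s r).map (fun combo => String.ofList combo) := by
  induction s generalizing r with
  | nil =>
    cases r with
    | zero => simp [pvRecB, PySem.List.combinations_zero]
    | succ r => simp [pvRecB, PySem.List.combinations_nil_succ]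
  | cons c cs ih =>
    cases r with
    | zero => simp [pvRecB, PySem.List.combinations_zero]
    | succ r =>
      simp [pvRecB, PySem.List.combinations_cons_succ, ih, List.map_map, Function.comp,
        String.toList_ofList]

-- ===== VERDICT (by name: the statement is the Claim_ definition above) =====
theorem k_length_combinations_spec : Claim_equal_k_length_combinations := by
  intro text k _
  unfold Spec_k_length_combinations k_length_combinations k_length_combinations_alt
  split
  · rfl
  · rw [PySem.List.foldl_append_eq_flatMap]
    simp only [List.flatMap_def, pvRecB_eq_combinations, List.nil_append]
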